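-- pv_equiv track=rewrite | github.com/seungjunGong/seungjunGong-baekjoonStudy | 프로그래머스/1/17681. ［1차］ 비밀지도/［1차］ 비밀지도.py | solution
-- ===== SOURCE A (Python) =====
-- def solution(n, arr1, arr2):
--     answer = []
--
--     for i in range(n):
--         line_1 = format(arr1[i], 'b').zfill(n)
--         line_2 = format(arr2[i], 'b').zfill(n)
--
--         block = ""
--         for j in range(n):
--             block += '#' if int(line_1[j]) | int(line_2[j]) else " "
--         answer.append(block)
--
--     return answer
-- ===== SOURCE B (Python) =====
-- def solution(n, arr1, arr2):
--     tr = {ord('1'): '#', ord('0'): ' '}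
--     answer = []
--     for i in range(n):
--         answer.append(format(arr1[i] | arr2[i], 'b').zfill(n).translate(tr))
--     return answer
-- ===== Notes on version B (the rewrite author's own statement) =====
-- stated objective: idiomatic
-- what changed: B replaces A's per-row inner loop over two separately formatted binary strings (digit-by-digit int() conversion and bitwise-or of single digits) with one integer bitwise OR per row followed by a single zero-padded binary format and a bulk str.translate mapping 1->'#', 0->' '.
-- outside the precondition, e.g. on solution(1, [2], [0]): A returns ['#'], B returns ['# ']; on solution(1, [-1], [0]): A raises ValueError, B returns ['-#']
import Mathlib
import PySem

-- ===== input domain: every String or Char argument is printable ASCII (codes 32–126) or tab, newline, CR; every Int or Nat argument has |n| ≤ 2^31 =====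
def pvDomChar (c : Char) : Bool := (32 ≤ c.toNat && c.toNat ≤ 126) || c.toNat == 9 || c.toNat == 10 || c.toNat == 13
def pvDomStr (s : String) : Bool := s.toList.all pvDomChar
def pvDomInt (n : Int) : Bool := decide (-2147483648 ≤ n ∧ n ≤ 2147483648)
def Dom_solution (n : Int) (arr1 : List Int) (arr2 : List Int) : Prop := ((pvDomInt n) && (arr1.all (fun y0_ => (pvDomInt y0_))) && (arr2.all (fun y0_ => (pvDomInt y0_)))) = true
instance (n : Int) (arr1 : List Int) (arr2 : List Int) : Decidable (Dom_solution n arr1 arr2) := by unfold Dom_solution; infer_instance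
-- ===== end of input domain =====

-- B replaces A's digit-by-digit inner loop over two separately formatted binary strings by one
-- integer bitwise OR per row followed by a single zero-padded format and a bulk character translation.

-- ===== PORT A =====
-- format(x, 'b') / str.zfill / int(c) for a digit char, shared by both ports (both Pythons call them)
def pvDigit (d : Nat) : Char := if d = 1 then '1' else '0'

def pvBinNat (a : Nat) : List Char :=
  if _h : a < 2 then [pvDigit a] else pvBinNat (a / 2) ++ [pvDigit (a % 2)]
decreasing_by exact Nat.div_lt_self (by omega) (by omega)

-- format(x, 'b') for any int (sign prefix for negatives)
def pvBin (x : Int) : List Char := if x < 0 then '-' :: pvBinNat (-x).toNat else pvBinNat x.toNat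

-- str.zfill on the char list (sign-aware, never truncates)
def pvZfill (s : List Char) (w : Nat) : List Char :=
  match s with
  | [] => List.replicate w '0'
  | c :: rest =>
    if c = '-' ∨ c = '+' then c :: (List.replicate (w - (rest.length + 1)) '0' ++ rest)
    else List.replicate (w - (rest.length + 1)) '0' ++ c :: rest

-- int(c) for a single digit char (exact on '0'..'9'; A only reaches digit chars inside Pre_)
def pvIntChar (c : Char) : Int := (c.toNat : Int) - 48

def solution (n : Int) (arr1 : List Int) (arr2 : List Int) : List String :=
  (PySem.List.pyRange 0 n 1).foldl (fun answer i =>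
    let line1 := pvZfill (pvBin (PySem.List.pyGetD arr1 i 0)) n.toNat
    let line2 := pvZfill (pvBin (PySem.List.pyGetD arr2 i 0)) n.toNat
    let block := (PySem.List.pyRange 0 n 1).foldl (fun b j =>
      b ++ (if PySem.Int.bor (pvIntChar (PySem.List.pyGetD line1 j '0'))
                             (pvIntChar (PySem.List.pyGetD line2 j '0')) ≠ 0 then "#" else " ")) ""
    answer ++ [block]) []

-- ===== PORT B =====
-- str.translate({ord('1'): '#', ord('0'): ' '}) applied per character
def pvTr (c : Char) : Char := if c = '1' then '#' else if c = '0' then ' ' else c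

def solution_alt (n : Int) (arr1 : List Int) (arr2 : List Int) : List String :=
  (PySem.List.pyRange 0 n 1).foldl (fun answer i =>
    answer ++ [String.ofList ((pvZfill
        (pvBin (PySem.Int.bor (PySem.List.pyGetD arr1 i 0) (PySem.List.pyGetD arr2 i 0)))
        n.toNat).map pvTr)]) []

-- ===== PRECONDITION & SPEC =====
-- Pre_ restricts to the problem's natural domain (the secret-map task guarantees 0 ≤ row < 2^n and
-- n rows per array): A raises ValueError on negative rows, and for rows ≥ 2^n it returns a value
-- built from misaligned over-long binary strings that is outside the task's natural domain.
def Pre_solution (n : Int) (arr1 : List Int) (arr2 : List Int) : Prop :=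
  n ≤ arr1.length ∧ n ≤ arr2.length ∧
  (∀ x ∈ arr1.take n.toNat, 0 ≤ x ∧ x < 2 ^ n.toNat) ∧
  (∀ x ∈ arr2.take n.toNat, 0 ≤ x ∧ x < 2 ^ n.toNat)
instance (n : Int) (arr1 : List Int) (arr2 : List Int) : Decidable (Pre_solution n arr1 arr2) := by unfold Pre_solution; infer_instance

def pvWitness_solution : Int × List Int × List Int := (2, [1, 2], [2, 1])

def Spec_solution (n : Int) (arr1 : List Int) (arr2 : List Int) (out : List String) : Prop := out = solution_alt n arr1 arr2
instance (n : Int) (arr1 : List Int) (arr2 : List Int) (out : List String) : Decidable (Spec_solution n arr1 arr2 out) := by unfold Spec_solution; infer_instance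

-- ===== CLAIM (what is proved, stated in full; the proofs are below) =====
def Claim_equal_solution : Prop := ∀ (n : Int) (arr1 : List Int) (arr2 : List Int), Dom_solution n arr1 arr2 → Pre_solution n arr1 arr2 → Spec_solution n arr1 arr2 (solution n arr1 arr2)

-- ===== LEMMAS AND PROOFS =====

-- width-N fixed bit string of a (MSB first), the common shape of both rows
def natBits : Nat → Nat → List Char
  | 0, _ => []
  | N + 1, a => natBits N (a / 2) ++ [pvDigit (a % 2)]

lemma natBits_length (N a : Nat) : (natBits N a).length = N := by
  induction N generalizing a with
  | zero => rfl
  | succ N ih => simp [natBits, ih]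

lemma natBits_zero (N : Nat) : natBits N 0 = List.replicate N '0' := by
  induction N with
  | zero => rfl
  | succ N ih => simp [natBits, ih, pvDigit, List.replicate_succ']

lemma natBits_mem (N a : Nat) : ∀ c ∈ natBits N a, c = '0' ∨ c = '1' := by
  induction N generalizing a with
  | zero => simp [natBits]
  | succ N ih =>
    intro c hc
    simp only [natBits, List.mem_append, List.mem_singleton] at hc
    rcases hc with h | h
    · exact ih _ _ h
    · subst h; unfold pvDigit; split_ifs <;> simp

lemma pyRange_nonpos (n : Int) (h : n ≤ 0) : PySem.List.pyRange 0 n 1 = [] := by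
  unfold PySem.List.pyRange; simp; intro h2; omega

lemma binNat_mem (a : Nat) : ∀ c ∈ pvBinNat a, c = '0' ∨ c = '1' := by
  induction a using Nat.strong_induction_on with
  | _ a ih =>
    intro c hc
    unfold pvBinNat at hc
    split_ifs at hc with h
    · simp at hc; subst hc; unfold pvDigit; split_ifs <;> simp
    · simp only [List.mem_append, List.mem_singleton] at hc
      rcases hc with h2 | h2
      · exact ih _ (Nat.div_lt_self (by omega) (by omega)) _ h2
      · subst h2; unfold pvDigit; split_ifs <;> simp

lemma binNat_ne_nil (a : Nat) : pvBinNat a ≠ [] := by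
  unfold pvBinNat; split_ifs <;> simp

lemma zfill_digits (s : List Char) (w : Nat) (hne : s ≠ [])
    (hd : ∀ c ∈ s, c = '0' ∨ c = '1') :
    pvZfill s w = List.replicate (w - s.length) '0' ++ s := by
  match s with
  | [] => exact absurd rfl hne
  | c :: rest =>
    have : ¬ (c = '-' ∨ c = '+') := by
      rcases hd c (by simp) with h | h <;> subst h <;> decide
    simp [pvZfill, this]

lemma zfill_binNat (N a : Nat) (h : a < 2 ^ (N + 1)) :
    pvZfill (pvBinNat a) (N + 1) = natBits (N + 1) a := by
  induction N generalizing a with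
  | zero =>
    have h2 : a < 2 := by simpa using h
    rw [pvBinNat]
    rw [dif_pos h2]
    rw [zfill_digits _ _ (by simp) (by intro c hc; simp at hc; subst hc; unfold pvDigit; split_ifs <;> simp)]
    have : a % 2 = a := Nat.mod_eq_of_lt h2
    simp [natBits, this]
  | succ N ih =>
    by_cases h2 : a < 2
    · rw [pvBinNat, dif_pos h2]
      rw [zfill_digits _ _ (by simp) (by intro c hc; simp at hc; subst hc; unfold pvDigit; split_ifs <;> simp)]
      have ha2 : a / 2 = 0 := Nat.div_eq_of_lt h2
      have ham : a % 2 = a := Nat.mod_eq_of_lt h2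
      rw [natBits, ha2, ham, natBits_zero]
      have hlen : N + 1 + 1 - [pvDigit a].length = N + 1 := by simp
      rw [hlen, List.replicate_succ']
    · rw [pvBinNat, dif_neg h2]
      have hdiv : a / 2 < 2 ^ (N + 1) := by
        rw [Nat.div_lt_iff_lt_mul (by omega)]
        calc a < 2 ^ (N + 2) := h
        _ = 2 ^ (N + 1) * 2 := by ring
      have ihh := ih _ hdiv
      rw [zfill_digits _ _ (by simp [binNat_ne_nil]) (by
        intro c hc; simp only [List.mem_append, List.mem_singleton] at hc
        rcases hc with hx | hx
        · exact binNat_mem _ _ hx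
        · subst hx; unfold pvDigit; split_ifs <;> simp)]
      rw [zfill_digits _ _ (binNat_ne_nil _) (binNat_mem _)] at ihh
      show List.replicate (N + 2 - (pvBinNat (a/2) ++ [pvDigit (a % 2)]).length) '0'
            ++ (pvBinNat (a/2) ++ [pvDigit (a % 2)]) = natBits (N + 2) a
      have hlen : (pvBinNat (a/2) ++ [pvDigit (a % 2)]).length = (pvBinNat (a/2)).length + 1 := by simp
      rw [hlen]
      have : N + 2 - ((pvBinNat (a/2)).length + 1) = N + 1 - (pvBinNat (a/2)).length := by omega
      rw [this, natBits, ← ihh, ← List.append_assoc]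

def pvOrC (c d : Char) : Char := if c = '1' ∨ d = '1' then '1' else '0'

lemma lor_div_two (a b : Nat) : (a ||| b) / 2 = a / 2 ||| b / 2 := by
  apply Nat.eq_of_testBit_eq
  intro i
  simp [Nat.testBit_div_two]

lemma lor_mod_two (a b : Nat) : (a ||| b) % 2 = a % 2 ||| b % 2 := by
  have h := Nat.testBit_lor a b 0
  simp only [Nat.testBit_zero] at h
  rcases Nat.mod_two_eq_zero_or_one a with ha | ha <;>
    rcases Nat.mod_two_eq_zero_or_one b with hb | hb <;>
    rcases Nat.mod_two_eq_zero_or_one (a ||| b) with hab | hab <;>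
    simp [ha, hb, hab] at h ⊢

lemma natBits_lor (N a b : Nat) :
    natBits N (a ||| b) = List.zipWith pvOrC (natBits N a) (natBits N b) := by
  induction N generalizing a b with
  | zero => rfl
  | succ N ih =>
    rw [natBits, natBits, natBits,
      List.zipWith_append (by rw [natBits_length, natBits_length]),
      lor_div_two, ih]
    congr 1
    have hor : pvDigit (a % 2 ||| b % 2) = pvOrC (pvDigit (a % 2)) (pvDigit (b % 2)) := by
      rcases Nat.mod_two_eq_zero_or_one a with ha | ha <;>
        rcases Nat.mod_two_eq_zero_or_one b with hb | hb <;>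
        rw [ha, hb] <;> decide
    rw [lor_mod_two, hor]
    rfl

lemma foldl_str {α : Type} (l : List α) (g : α → List Char) (init : List Char) :
    l.foldl (fun b j => b ++ String.ofList (g j)) (String.ofList init)
      = String.ofList (l.foldl (fun b j => b ++ g j) init) := by
  induction l generalizing init with
  | nil => rfl
  | cons x t ih => rw [List.foldl_cons, ← String.ofList_append, ih, List.foldl_cons]

-- the per-row equality, at the Nat level
lemma row_eq (m a b : Nat) (hm : 0 < m) (ha : a < 2 ^ m) (hb : b < 2 ^ m) :
    (List.range m).foldl (fun (s : String) (j : Nat) =>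
        s ++ (if PySem.Int.bor
                (pvIntChar (PySem.List.pyGetD (pvZfill (pvBinNat a) m) (j : Int) '0'))
                (pvIntChar (PySem.List.pyGetD (pvZfill (pvBinNat b) m) (j : Int) '0')) ≠ 0
              then "#" else " ")) ""
      = String.ofList ((pvZfill (pvBinNat (a ||| b)) m).map pvTr) := by
  obtain ⟨M, rfl⟩ : ∃ M, m = M + 1 := ⟨m - 1, by omega⟩
  rw [zfill_binNat M a ha, zfill_binNat M b hb,
      zfill_binNat M (a ||| b) (Nat.or_lt_two_pow ha hb)]
  set L1 := natBits (M + 1) a with hL1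
  set L2 := natBits (M + 1) b with hL2
  have key : ∀ k < M + 1,
      (if PySem.Int.bor (pvIntChar (PySem.List.pyGetD L1 (k : Int) '0'))
            (pvIntChar (PySem.List.pyGetD L2 (k : Int) '0')) ≠ 0
       then "#" else " ")
      = String.ofList [pvTr ((natBits (M + 1) (a ||| b)).getD k '0')] := by
    intro k hk
    have hk1 : k < L1.length := by rw [hL1, natBits_length]; omega
    have hk2 : k < L2.length := by rw [hL2, natBits_length]; omega
    rw [PySem.List.pyGetD_natCast, PySem.List.pyGetD_natCast,
        List.getD_eq_getElem _ _ hk1, List.getD_eq_getElem _ _ hk2]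
    have hzip : (natBits (M + 1) (a ||| b)).getD k '0' = pvOrC L1[k] L2[k] := by
      rw [natBits_lor,
          List.getD_eq_getElem _ _ (by rw [List.length_zipWith, natBits_length, natBits_length]; omega)]
      simp [hL1, hL2]
    rw [hzip]
    rcases natBits_mem (M+1) a _ (List.getElem_mem hk1) with h1 | h1 <;>
      rcases natBits_mem (M+1) b _ (List.getElem_mem hk2) with h2 | h2 <;>
      rw [h1, h2] <;> decide
  have step1 : (List.range (M + 1)).foldl (fun (s : String) (k : Nat) =>
        s ++ (if PySem.Int.bor
                (pvIntChar (PySem.List.pyGetD L1 (k : Int) '0'))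
                (pvIntChar (PySem.List.pyGetD L2 (k : Int) '0')) ≠ 0
              then "#" else " ")) ""
      = (List.range (M + 1)).foldl (fun s k =>
          s ++ String.ofList [pvTr ((natBits (M + 1) (a ||| b)).getD k '0')]) "" := by
    apply PySem.List.foldl_congr_mem
    intro acc k hkmem
    rw [key k (List.mem_range.mp hkmem)]
  rw [step1, show ("" : String) = String.ofList [] from rfl, foldl_str,
      PySem.List.foldl_append_singleton_eq_map, List.nil_append]
  congr 1
  apply List.ext_getElem
  · simp [natBits_length]
  · intro i h1 h2
    simp only [List.getElem_map, List.getElem_range]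
    rw [List.getD_eq_getElem _ _ (by rw [natBits_length]; simpa using h1)]

-- ===== VERDICT (by name: the statement is the Claim_ definition above) =====
theorem solution_spec : Claim_equal_solution := by
  intro n arr1 arr2 hdom hpre
  unfold Spec_solution solution solution_alt
  obtain ⟨hl1, hl2, hb1, hb2⟩ := hpre
  by_cases hn : n ≤ 0
  · rw [pyRange_nonpos n hn]
    rfl
  · obtain ⟨m, rfl⟩ : ∃ m : Nat, n = (m : Int) := ⟨n.toNat, by omega⟩
    rw [PySem.List.pyRange_zero_natCast, List.foldl_map, List.foldl_map,
        PySem.List.foldl_append_singleton_eq_map, PySem.List.foldl_append_singleton_eq_map]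
    simp only [List.nil_append]
    apply List.map_congr_left
    intro k hkmem
    have hk : k < m := List.mem_range.mp hkmem
    have hkl1 : k < arr1.length := by omega
    have hkl2 : k < arr2.length := by omega
    rw [PySem.List.pyGetD_natCast, PySem.List.pyGetD_natCast,
        List.getD_eq_getElem _ _ hkl1, List.getD_eq_getElem _ _ hkl2]
    have htk1 : k < (arr1.take ((m : Int)).toNat).length := by
      rw [List.length_take]; omega
    have htk2 : k < (arr2.take ((m : Int)).toNat).length := by
      rw [List.length_take]; omega
    have hmem1 : arr1[k] ∈ arr1.take ((m : Int)).toNat := by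
      rw [← List.getElem_take (xs := arr1) (h := htk1)]
      exact List.getElem_mem _
    have hmem2 : arr2[k] ∈ arr2.take ((m : Int)).toNat := by
      rw [← List.getElem_take (xs := arr2) (h := htk2)]
      exact List.getElem_mem _
    obtain ⟨ha0, ha1⟩ := hb1 _ hmem1
    obtain ⟨hb0, hb1'⟩ := hb2 _ hmem2
    have htn : ((m : Int)).toNat = m := by simp
    rw [htn] at ha1 hb1'
    set A := arr1[k] with hA
    set B := arr2[k] with hB
    have haN : A.toNat < 2 ^ m := by
      rw [Int.toNat_lt ha0]; exact_mod_cast ha1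
    have hbN : B.toNat < 2 ^ m := by
      rw [Int.toNat_lt hb0]; exact_mod_cast hb1'
    have hbinA : pvBin A = pvBinNat A.toNat := by unfold pvBin; rw [if_neg (by omega)]
    have hbinB : pvBin B = pvBinNat B.toNat := by unfold pvBin; rw [if_neg (by omega)]
    have hbor : pvBin (PySem.Int.bor A B) = pvBinNat (A.toNat ||| B.toNat) := by
      rw [PySem.Int.bor_of_nonneg ha0 hb0]
      unfold pvBin
      rw [if_neg (not_lt.mpr (Int.natCast_nonneg _))]
      simp
    simp only [hbinA, hbinB, hbor, htn]
    rw [List.foldl_map]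
    exact row_eq m A.toNat B.toNat (by omega) haN hbN
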